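-- pv_equiv track=rewrite | github.com/MThushar123/Python_Tech_Training | july_31.py | second_largest_in_sliding_window
-- ===== SOURCE A (Python) =====
-- def second_largest_in_sliding_window(nums, k):
--     if len(nums) < 2 or k < 2:
--         return []
--
--     result = []
--
--     for i in range(len(nums) - k + 1):
--         window = nums[i:i + k]
--
--         first, second = float('-inf'), float('-inf')
--         for num in window:
--             if num > first:
--                 second = first
--                 first = num
--             elif first > num > second:
--                 second = num
--
--         if second == float('-inf'):
--             result.append(None)
--         else:
--             result.append(second)
--
--     return result
-- ===== SOURCE B (Python) =====
-- def _mx(a, b):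
--     # max of two "largest-so-far" values where None means minus infinity
--     if a is None:
--         return b
--     if b is None:
--         return a
--     return a if a >= b else b
--
--
-- def _merge(p, q):
--     # combine two (largest, second-largest-distinct) summaries
--     f1, s1 = p
--     f2, s2 = q
--     if f2 is None or (f1 is not None and f1 > f2):
--         return (f1, _mx(s1, f2))
--     if f1 is None or f2 > f1:
--         return (f2, _mx(f1, s2))
--     return (f1, _mx(s1, s2))
--
--
-- def second_largest_in_sliding_window(nums, k):
--     if len(nums) < 2 or k < 2:
--         return []
--     n = len(nums)
--     if n < k:
--         return []
--     # pre[j]: summary of nums[start of j's k-block .. j]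
--     pre = []
--     cur = (None, None)
--     for j in range(n):
--         cur = (nums[j], None) if j % k == 0 else _merge(cur, (nums[j], None))
--         pre.append(cur)
--     # suf[j]: summary of nums[j .. end of j's k-block] (clipped at n-1)
--     suf_rev = []
--     cur = (None, None)
--     for j in range(n - 1, -1, -1):
--         cur = (nums[j], None) if j % k == k - 1 else _merge((nums[j], None), cur)
--         suf_rev.append(cur)
--     suf = suf_rev[::-1]
--     return [_merge(suf[i], pre[i + k - 1])[1] for i in range(n - k + 1)]
-- ===== Notes on version B (the rewrite author's own statement) =====
-- stated objective: faster
-- what changed: Replaced the per-window O(k) rescans by an O(n) block decomposition: per k-block prefix and suffix (largest, second-largest-distinct) summaries are precomputed in two linear passes and each window's answer is the merge of one suffix summary and one prefix summary.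
import Mathlib
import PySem

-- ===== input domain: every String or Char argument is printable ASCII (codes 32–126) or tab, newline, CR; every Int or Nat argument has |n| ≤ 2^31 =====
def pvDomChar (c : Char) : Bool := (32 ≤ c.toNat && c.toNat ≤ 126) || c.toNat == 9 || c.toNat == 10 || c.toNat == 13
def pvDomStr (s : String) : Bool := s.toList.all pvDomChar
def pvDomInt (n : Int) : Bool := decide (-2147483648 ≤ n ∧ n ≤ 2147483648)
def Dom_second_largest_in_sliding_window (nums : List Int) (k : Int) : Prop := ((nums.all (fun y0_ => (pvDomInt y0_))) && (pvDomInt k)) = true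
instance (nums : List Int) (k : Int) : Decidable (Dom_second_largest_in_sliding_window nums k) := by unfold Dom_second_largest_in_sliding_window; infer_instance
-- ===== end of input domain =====

-- B replaces A's per-window rescan by a block decomposition: per-k-block prefix and
-- suffix (largest, second-largest-distinct) summaries, one merge per window.


-- ===== PORT A =====
-- inner loop body: first/second start at float('-inf'); since all data are ints,
-- 'none' represents -inf exactly (an int never equals -inf)
def pvStepA (fs : Option Int × Option Int) (num : Int) : Option Int × Option Int :=
  if (match fs.1 with | none => true | some f => num > f) then        -- num > first
    (some num, fs.1)                                                  -- second = first; first = num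
  else if (match fs.1 with | none => false | some f => f > num) &&
          (match fs.2 with | none => true | some s => num > s) then   -- first > num > second
    (fs.1, some num)                                                  -- second = num
  else fs

def second_largest_in_sliding_window (nums : List Int) (k : Int) : List (Option Int) :=
  if nums.length < 2 ∨ k < 2 then []
  else
    (PySem.List.pyRange 0 ((nums.length : Int) - k + 1) 1).foldl
      (fun result i =>
        let window := PySem.List.slice nums (some i) (some (i + k))
        let fs := window.foldl pvStepA (none, none)
        -- if second == float('-inf'): append None else append second
        result ++ [(match fs.2 with | none => none | some s => some s)]) []

-- ===== PORT B =====
-- _mx: max of two values where none plays None = -inf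
def pvMx (a b : Option Int) : Option Int :=
  match a with
  | none => b
  | some av => match b with
    | none => a
    | some bv => if av ≥ bv then some av else some bv

-- _merge: combine two (largest, second-largest-distinct) summaries
def pvMerge (p q : Option Int × Option Int) : Option Int × Option Int :=
  if (match q.1 with | none => true | some f2 => (match p.1 with | none => false | some f1 => f1 > f2)) then
    (p.1, pvMx p.2 q.1)
  else if (match p.1 with | none => true | some f1 => (match q.1 with | none => false | some f2 => f2 > f1)) then
    (q.1, pvMx p.1 q.2)
  else
    (p.1, pvMx p.2 q.2)

-- the indices nums[j] taken in both loops are always in range (0 ≤ j < len), so pyGetD is exact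
def second_largest_in_sliding_window_alt (nums : List Int) (k : Int) : List (Option Int) :=
  if nums.length < 2 ∨ k < 2 then []
  else
    let n : Int := (nums.length : Int)
    if n < k then []
    else
      let pre := ((PySem.List.pyRange 0 n 1).foldl
        (fun (st : (Option Int × Option Int) × List (Option Int × Option Int)) j =>
          let cur := if PySem.Int.mod j k = 0 then ((some (PySem.List.pyGetD nums j 0), none) : Option Int × Option Int)
                     else pvMerge st.1 (some (PySem.List.pyGetD nums j 0), none)
          (cur, st.2 ++ [cur])) ((none, none), [])).2
      let sufRev := ((PySem.List.pyRange (n - 1) (-1) (-1)).foldl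
        (fun (st : (Option Int × Option Int) × List (Option Int × Option Int)) j =>
          let cur := if PySem.Int.mod j k = k - 1 then ((some (PySem.List.pyGetD nums j 0), none) : Option Int × Option Int)
                     else pvMerge (some (PySem.List.pyGetD nums j 0), none) st.1
          (cur, st.2 ++ [cur])) ((none, none), [])).2
      let suf := sufRev.reverse
      (PySem.List.pyRange 0 (n - k + 1) 1).map (fun i =>
        (pvMerge (PySem.List.pyGetD suf i (none, none)) (PySem.List.pyGetD pre (i + k - 1) (none, none))).2)

-- ===== PRECONDITION & SPEC =====
def Spec_second_largest_in_sliding_window (nums : List Int) (k : Int) (out : List (Option Int)) : Prop := out = second_largest_in_sliding_window_alt nums k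
instance (nums : List Int) (k : Int) (out : List (Option Int)) : Decidable (Spec_second_largest_in_sliding_window nums k out) := by unfold Spec_second_largest_in_sliding_window; infer_instance

-- ===== CLAIM (what is proved, stated in full; the proofs are below) =====
def Claim_equal_second_largest_in_sliding_window : Prop := ∀ (nums : List Int) (k : Int), Dom_second_largest_in_sliding_window nums k → Spec_second_largest_in_sliding_window nums k (second_largest_in_sliding_window nums k)

-- ===== LEMMAS AND PROOFS =====

-- canonical summary of a list: A's inner loop from (-inf, -inf)
def pvTop2 (v : List Int) : Option Int × Option Int := v.foldl pvStepA (none, none)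

-- well-formed summaries: second < first, and no second without a first
def pvOk (p : Option Int × Option Int) : Prop :=
  match p with
  | (none, s) => s = none
  | (some _, none) => True
  | (some f, some s) => s < f

theorem pvMx_noneL (b : Option Int) : pvMx none b = b := rfl
theorem pvMx_noneR (a : Option Int) : pvMx a none = a := by cases a <;> rfl
theorem pvMx_some (a b : Int) : pvMx (some a) (some b) = if a ≥ b then some a else some b := rfl

theorem pvMerge_noneR (p : Option Int × Option Int) (s2 : Option Int) :
    pvMerge p (none, s2) = p := by
  obtain ⟨f, s⟩ := p; simp [pvMerge, pvMx_noneR]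

theorem pvMerge_some (f1 f2 : Int) (s1 s2 : Option Int) :
    pvMerge (some f1, s1) (some f2, s2) =
      if f1 > f2 then (some f1, pvMx s1 (some f2))
      else if f2 > f1 then (some f2, pvMx (some f1) s2)
      else (some f1, pvMx s1 s2) := by
  simp only [pvMerge]; split_ifs <;> simp_all

theorem pvMerge_noneL (f2 : Int) (s2 : Option Int) :
    pvMerge (none, none) (some f2, s2) = (some f2, s2) := by
  simp [pvMerge, pvMx_noneL]

theorem pvMerge_id_right (p : Option Int × Option Int) : pvMerge p (none, none) = p :=
  pvMerge_noneR p none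

theorem pvMerge_idem (p : Option Int × Option Int) : pvMerge p p = p := by
  obtain ⟨f, s⟩ := p
  cases f <;> cases s <;> simp [pvMerge, pvMx]

theorem pvStepA_eq_merge (p : Option Int × Option Int) (x : Int) :
    pvStepA p x = pvMerge p (some x, none) := by
  obtain ⟨f, s⟩ := p
  cases f <;> cases s <;> simp [pvStepA, pvMerge, pvMx] <;> split_ifs <;>
    simp_all <;> omega

theorem pvOk_step (p : Option Int × Option Int) (x : Int) (h : pvOk p) : pvOk (pvStepA p x) := by
  obtain ⟨f, s⟩ := p
  cases f <;> cases s <;> simp only [pvStepA, pvOk] at * <;> split_ifs <;>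
    simp_all [pvOk] <;> omega

theorem pvOk_foldl (v : List Int) (p : Option Int × Option Int) (h : pvOk p) :
    pvOk (v.foldl pvStepA p) := by
  induction v generalizing p with
  | nil => exact h
  | cons x v ih => exact ih _ (pvOk_step p x h)

theorem pvOk_top2 (v : List Int) : pvOk (pvTop2 v) := pvOk_foldl v _ (by trivial)

theorem pvOk_cases (p : Option Int × Option Int) (h : pvOk p) :
    p = (none, none) ∨ (∃ f, p = (some f, none)) ∨ (∃ f s, s < f ∧ p = (some f, some s)) := by
  obtain ⟨f, s⟩ := p
  cases f <;> cases s <;> simp_all [pvOk]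

set_option maxHeartbeats 2000000 in
theorem pvMerge_assoc_single (p t : Option Int × Option Int) (x : Int)
    (hp : pvOk p) (ht : pvOk t) :
    pvMerge (pvMerge p (some x, none)) t = pvMerge p (pvMerge (some x, none) t) := by
  rcases pvOk_cases p hp with h1 | ⟨f1, h1⟩ | ⟨f1, s1, hs1, h1⟩ <;>
  rcases pvOk_cases t ht with h2 | ⟨f2, h2⟩ | ⟨f2, s2, hs2, h2⟩ <;>
  subst h1 <;> subst h2 <;>
    (repeat' (first
      | split_ifs
      | simp only [pvMerge_some, pvMerge_noneR, pvMerge_noneL, pvMx_noneL, pvMx_noneR,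
          pvMx_some, ge_iff_le] at *)) <;>
    simp only [Prod.mk.injEq, Option.some.injEq, reduceCtorEq] <;>
    first | trivial | omega | (exfalso; omega)

theorem pv_foldl_merge (v : List Int) (p : Option Int × Option Int) (hp : pvOk p) :
    v.foldl pvStepA p = pvMerge p (pvTop2 v) := by
  induction v generalizing p with
  | nil => exact (pvMerge_id_right p).symm
  | cons x v ih =>
      have hx : pvStepA (none, none) x = ((some x, none) : Option Int × Option Int) := by
        simp [pvStepA]
      have h1 : (x :: v).foldl pvStepA p = pvMerge (pvMerge p (some x, none)) (pvTop2 v) := by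
        have h := ih (pvStepA p x) (pvOk_step p x hp)
        simpa [pvStepA_eq_merge] using h
      have h2 : pvTop2 (x :: v) = pvMerge (some x, none) (pvTop2 v) := by
        have h := ih ((some x, none) : Option Int × Option Int) (by trivial)
        simpa [pvTop2, hx] using h
      rw [h1, h2, pvMerge_assoc_single p (pvTop2 v) x hp (pvOk_top2 v)]

theorem pvTop2_append (u v : List Int) : pvTop2 (u ++ v) = pvMerge (pvTop2 u) (pvTop2 v) := by
  have h : pvTop2 (u ++ v) = v.foldl pvStepA (pvTop2 u) := by simp [pvTop2, List.foldl_append]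
  rw [h, pv_foldl_merge v (pvTop2 u) (pvOk_top2 u)]

theorem pvTop2_singleton (x : Int) : pvTop2 [x] = (some x, none) := by simp [pvTop2, pvStepA]

theorem pvTop2_cons (x : Int) (v : List Int) :
    pvTop2 (x :: v) = pvMerge (some x, none) (pvTop2 v) := by
  have hx : pvStepA (none, none) x = ((some x, none) : Option Int × Option Int) := by
    simp [pvStepA]
  have h : pvTop2 (x :: v) = v.foldl pvStepA ((some x, none) : Option Int × Option Int) := by
    simp [pvTop2, hx]
  rw [h, pv_foldl_merge v _ (by trivial)]

-- B's forward pass as a recursion over the index: summary of the block prefix ending at j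
def pvPre (l : List Int) (K : Nat) (j : Nat) : Option Int × Option Int :=
  if h : j % K = 0 then (some (l.getD j 0), none)
  else pvMerge (pvPre l K (j - 1)) (some (l.getD j 0), none)
termination_by j
decreasing_by
  have hj : j ≠ 0 := by intro h0; subst h0; simp at h
  omega

-- B's backward pass: summary of the block suffix starting at j (clipped at the end)
def pvSuf (l : List Int) (K : Nat) (j : Nat) : Option Int × Option Int :=
  if h : j % K = K - 1 ∨ l.length ≤ j + 1 then (some (l.getD j 0), none)
  else pvMerge (some (l.getD j 0), none) (pvSuf l K (j + 1))
termination_by l.length - j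
decreasing_by
  push_neg at h
  omega

theorem pv_mod_pred (K j : Nat) (hK : 0 < K) (h : j % K ≠ 0) :
    (j - 1) % K = j % K - 1 := by
  have hd := Nat.div_add_mod j K
  have hr : j % K < K := Nat.mod_lt _ hK
  have h1 : j - 1 = K * (j / K) + (j % K - 1) := by omega
  rw [h1, Nat.mul_add_mod, Nat.mod_eq_of_lt (by omega)]

theorem pv_mod_succ (K j : Nat) (hK : 0 < K) (h : j % K ≠ K - 1) :
    (j + 1) % K = j % K + 1 := by
  have hd := Nat.div_add_mod j K
  have hr : j % K < K := Nat.mod_lt _ hK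
  have h1 : j + 1 = K * (j / K) + (j % K + 1) := by omega
  rw [h1, Nat.mul_add_mod, Nat.mod_eq_of_lt (by omega)]

theorem pv_take_one (l : List Int) (j : Nat) (hj : j < l.length) :
    (l.drop j).take 1 = [l.getD j 0] := by
  rw [List.getD_eq_getElem l 0 hj, List.drop_eq_getElem_cons hj]
  rfl

theorem pv_take_succ (l : List Int) (j m : Nat) (hj : j < l.length) :
    (l.drop j).take (1 + m) = l.getD j 0 :: (l.drop (j + 1)).take m := by
  rw [List.drop_eq_getElem_cons hj, List.getD_eq_getElem l 0 hj, Nat.add_comm 1 m,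
    List.take_succ_cons]

theorem pvPre_spec (l : List Int) (K : Nat) (hK : 0 < K) :
    ∀ j, j < l.length → pvPre l K j = pvTop2 ((l.drop (j - j % K)).take (j % K + 1)) := by
  intro j
  induction j using Nat.strong_induction_on with
  | _ j ih =>
    intro hj
    by_cases h : j % K = 0
    · rw [pvPre, dif_pos h, h, Nat.sub_zero, Nat.zero_add, pv_take_one l j hj,
        pvTop2_singleton]
    · have hj0 : j ≠ 0 := by intro h0; subst h0; simp at h
      have hr : j % K < K := Nat.mod_lt _ hK
      have hrle : j % K ≤ j := Nat.mod_le j K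
      have hm : (j - 1) % K = j % K - 1 := pv_mod_pred K j hK h
      have hb : (j - 1) - (j - 1) % K = j - j % K := by omega
      rw [pvPre, dif_neg h, ih (j - 1) (by omega) (by omega), hm]
      have hb' : j - 1 - (j % K - 1) = j - j % K := by omega
      have h4 : j % K - 1 + 1 = j % K := by omega
      rw [hb', h4]
      have h2 : (l.drop (j - j % K)).take (j % K + 1)
          = (l.drop (j - j % K)).take (j % K) ++ [l.getD j 0] := by
        rw [List.take_add, List.drop_drop]
        have h3 : j - j % K + j % K = j := by omega
        rw [h3, pv_take_one l j hj]
      rw [h2, pvTop2_append, pvTop2_singleton]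

theorem pvSuf_spec (l : List Int) (K : Nat) (hK : 0 < K) :
    ∀ j, j < l.length →
      pvSuf l K j = pvTop2 ((l.drop j).take (min (K - j % K) (l.length - j))) := by
  have main : ∀ m j, j < l.length → l.length - j = m →
      pvSuf l K j = pvTop2 ((l.drop j).take (min (K - j % K) (l.length - j))) := by
    intro m
    induction m using Nat.strong_induction_on with
    | _ m ih =>
      intro j hj hm
      have hr : j % K < K := Nat.mod_lt _ hK
      by_cases h : j % K = K - 1 ∨ l.length ≤ j + 1
      · have hmin : min (K - j % K) (l.length - j) = 1 := by omega
        rw [pvSuf, dif_pos h, hmin, pv_take_one l j hj, pvTop2_singleton]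
      · push_neg at h
        obtain ⟨h1, h2⟩ := h
        have hms : (j + 1) % K = j % K + 1 := pv_mod_succ K j hK h1
        have hmin : min (K - j % K) (l.length - j)
            = 1 + min (K - (j + 1) % K) (l.length - (j + 1)) := by
          rw [hms]; omega
        rw [pvSuf, dif_neg (by push_neg; exact ⟨h1, h2⟩),
          ih (l.length - (j + 1)) (by omega) (j + 1) h2 rfl, hmin,
          pv_take_succ l j _ hj, pvTop2_cons]
  intro j hj
  exact main (l.length - j) j hj rfl

theorem pv_window (l : List Int) (K : Nat) (hK : 0 < K) (i : Nat)
    (hi : i + K ≤ l.length) :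
    pvMerge (pvSuf l K i) (pvPre l K (i + K - 1)) = pvTop2 ((l.drop i).take K) := by
  have hiK : i < l.length := by omega
  have hiK1 : i + K - 1 < l.length := by omega
  have hd := Nat.div_add_mod i K
  have hr : i % K < K := Nat.mod_lt _ hK
  by_cases h : i % K = 0
  · have hmin : min (K - i % K) (l.length - i) = K := by omega
    have hmod : (i + K - 1) % K = K - 1 := by
      have h1 : i + K - 1 = K * (i / K) + (K - 1) := by omega
      rw [h1, Nat.mul_add_mod, Nat.mod_eq_of_lt (by omega)]
    rw [pvSuf_spec l K hK i hiK, pvPre_spec l K hK _ hiK1, hmin, hmod]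
    have e1 : K - 1 + 1 = K := by omega
    have e2 : i + K - 1 - (K - 1) = i := by omega
    rw [e1, e2]
    exact pvMerge_idem _
  · have hmin : min (K - i % K) (l.length - i) = K - i % K := by omega
    have hmod : (i + K - 1) % K = i % K - 1 := by
      have h1 : i + K - 1 = K * (i / K + 1) + (i % K - 1) := by
        rw [Nat.mul_add, Nat.mul_one]; omega
      rw [h1, Nat.mul_add_mod, Nat.mod_eq_of_lt (by omega)]
    rw [pvSuf_spec l K hK i hiK, pvPre_spec l K hK _ hiK1, hmin, hmod]
    have e1 : i % K - 1 + 1 = i % K := by omega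
    have e2 : i + K - 1 - (i % K - 1) = i + (K - i % K) := by omega
    rw [e1, e2]
    have hKsplit : K - i % K + i % K = K := by omega
    have hsp := @List.take_add Int (l.drop i) (K - i % K) (i % K)
    rw [List.drop_drop, hKsplit] at hsp
    rw [hsp, pvTop2_append]

-- the forward fold produces exactly the pvPre table
theorem pv_fold_pre_aux (l : List Int) (k : Int) (hk : 0 < k) (m : Nat) :
    (List.range m).foldl
      (fun (st : (Option Int × Option Int) × List (Option Int × Option Int)) (j : Nat) =>
        let cur := if PySem.Int.mod (j : Int) k = 0 then ((some (PySem.List.pyGetD l (j : Int) 0), none) : Option Int × Option Int)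
                   else pvMerge st.1 (some (PySem.List.pyGetD l (j : Int) 0), none)
        (cur, st.2 ++ [cur])) ((none, none), [])
    = ((if m = 0 then ((none, none) : Option Int × Option Int) else pvPre l k.toNat (m - 1)),
       (List.range m).map (pvPre l k.toNat)) := by
  have hcast : (k.toNat : Int) = k := Int.toNat_of_nonneg (le_of_lt hk)
  induction m with
  | zero => simp
  | succ m ih =>
      have hmod : PySem.Int.mod (m : Int) k = ((m % k.toNat : Nat) : Int) := by
        conv_lhs => rw [← hcast, PySem.Int.mod_natCast]
      have hget : PySem.List.pyGetD l (m : Int) 0 = l.getD m 0 :=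
        PySem.List.pyGetD_natCast l m 0
      rw [List.range_succ, List.foldl_append, ih, List.foldl_cons, List.foldl_nil]
      by_cases h : m % k.toNat = 0
      · have hc : PySem.Int.mod (m : Int) k = 0 := by rw [hmod, h]; simp
        have hpre : pvPre l k.toNat m = ((some (l.getD m 0), none) : Option Int × Option Int) := by
          rw [pvPre, dif_pos h]
        simp only [hget, if_pos hc]
        rw [List.map_append, if_neg (Nat.succ_ne_zero m), Nat.add_sub_cancel,
          List.map_cons, List.map_nil, hpre]
      · have hm0 : m ≠ 0 := by intro h0; subst h0; simp at h
        have hc : ¬ PySem.Int.mod (m : Int) k = 0 := by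
          rw [hmod]
          exact fun hh => h (by exact_mod_cast hh)
        have hpre : pvPre l k.toNat m
            = pvMerge (pvPre l k.toNat (m - 1)) ((some (l.getD m 0), none) : Option Int × Option Int) := by
          rw [pvPre, dif_neg h]
        simp only [hget, if_neg hc, if_neg hm0]
        rw [List.map_append, if_neg (Nat.succ_ne_zero m), Nat.add_sub_cancel,
          List.map_cons, List.map_nil, hpre]

theorem pv_fold_pre (l : List Int) (k : Int) (hk : 0 < k) :
    (((PySem.List.pyRange 0 (l.length : Int) 1).foldl
        (fun (st : (Option Int × Option Int) × List (Option Int × Option Int)) j =>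
          let cur := if PySem.Int.mod j k = 0 then ((some (PySem.List.pyGetD l j 0), none) : Option Int × Option Int)
                     else pvMerge st.1 (some (PySem.List.pyGetD l j 0), none)
          (cur, st.2 ++ [cur])) ((none, none), [])).2)
      = (List.range l.length).map (pvPre l k.toNat) := by
  rw [PySem.List.pyRange_zero_natCast, List.foldl_map, pv_fold_pre_aux l k hk]

theorem pv_fold_suf_aux (l : List Int) (k : Int) (hk : 0 < k) :
    ∀ m, m ≤ l.length →
    (List.range m).foldl
      (fun (st : (Option Int × Option Int) × List (Option Int × Option Int)) (t : Nat) =>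
        let cur := if PySem.Int.mod ((l.length : Int) - 1 - (t : Int)) k = k - 1 then
                     ((some (PySem.List.pyGetD l ((l.length : Int) - 1 - (t : Int)) 0), none) : Option Int × Option Int)
                   else pvMerge (some (PySem.List.pyGetD l ((l.length : Int) - 1 - (t : Int)) 0), none) st.1
        (cur, st.2 ++ [cur])) ((none, none), [])
    = ((if m = 0 then ((none, none) : Option Int × Option Int) else pvSuf l k.toNat (l.length - m)),
       (List.range m).map (fun t => pvSuf l k.toNat (l.length - 1 - t))) := by
  have hcast : (k.toNat : Int) = k := Int.toNat_of_nonneg (le_of_lt hk)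
  have hK1 : 1 ≤ k.toNat := by omega
  intro m
  induction m with
  | zero => simp
  | succ m ih =>
      intro hm1
      have hm : m ≤ l.length := by omega
      have hj : ((l.length : Int) - 1 - (m : Int)) = ((l.length - 1 - m : Nat) : Int) := by
        push_cast
        omega
      have hmod : PySem.Int.mod ((l.length : Int) - 1 - (m : Int)) k
          = (((l.length - 1 - m) % k.toNat : Nat) : Int) := by
        conv_lhs => rw [hj, ← hcast, PySem.Int.mod_natCast]
      have hk1c : k - 1 = ((k.toNat - 1 : Nat) : Int) := by push_cast; omega
      have hget : PySem.List.pyGetD l ((l.length : Int) - 1 - (m : Int)) 0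
          = l.getD (l.length - 1 - m) 0 := by
        rw [hj, PySem.List.pyGetD_natCast]
      have hidx : l.length - (m + 1) = l.length - 1 - m := by omega
      rw [List.range_succ, List.foldl_append, ih hm, List.foldl_cons, List.foldl_nil]
      by_cases h : (l.length - 1 - m) % k.toNat = k.toNat - 1
      · have hc : PySem.Int.mod ((l.length : Int) - 1 - (m : Int)) k = k - 1 := by
          rw [hmod, h, hk1c]
        have hsuf : pvSuf l k.toNat (l.length - 1 - m)
            = ((some (l.getD (l.length - 1 - m) 0), none) : Option Int × Option Int) := by
          rw [pvSuf, dif_pos (Or.inl h)]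
        simp only [hget, if_pos hc]
        rw [List.map_append, if_neg (Nat.succ_ne_zero m), hidx,
          List.map_cons, List.map_nil, hsuf]
      · have hc : ¬ PySem.Int.mod ((l.length : Int) - 1 - (m : Int)) k = k - 1 := by
          rw [hmod, hk1c]
          exact fun hh => h (by exact_mod_cast hh)
        by_cases hm0 : m = 0
        · subst hm0
          have hend : l.length ≤ (l.length - 1) + 1 := by omega
          have hsuf : pvSuf l k.toNat (l.length - 1)
              = ((some (l.getD (l.length - 1) 0), none) : Option Int × Option Int) := by
            rw [pvSuf, dif_pos (Or.inr hend)]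
          simp only [hget, if_neg hc, eq_self_iff_true, if_true, Nat.sub_zero, Nat.zero_add]
          rw [List.map_append, if_neg (Nat.succ_ne_zero 0), pvMerge_id_right,
            List.map_cons, List.map_nil]
          simp only [Nat.sub_zero]
          rw [hsuf]
        · have hlt : (l.length - 1 - m) + 1 < l.length := by omega
          have hsuf : pvSuf l k.toNat (l.length - 1 - m)
              = pvMerge (some (l.getD (l.length - 1 - m) 0), none)
                  (pvSuf l k.toNat ((l.length - 1 - m) + 1)) := by
            rw [pvSuf, dif_neg (by push_neg; exact ⟨h, by omega⟩)]
          have hidx2 : l.length - m = (l.length - 1 - m) + 1 := by omega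
          simp only [hget, if_neg hc, if_neg hm0]
          rw [List.map_append, if_neg (Nat.succ_ne_zero m), hidx,
            hidx2, List.map_cons, List.map_nil, hsuf]

theorem pv_fold_suf (l : List Int) (k : Int) (hk : 0 < k) :
    ((((PySem.List.pyRange ((l.length : Int) - 1) (-1) (-1)).foldl
        (fun (st : (Option Int × Option Int) × List (Option Int × Option Int)) j =>
          let cur := if PySem.Int.mod j k = k - 1 then ((some (PySem.List.pyGetD l j 0), none) : Option Int × Option Int)
                     else pvMerge (some (PySem.List.pyGetD l j 0), none) st.1
          (cur, st.2 ++ [cur])) ((none, none), [])).2).reverse)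
      = (List.range l.length).map (pvSuf l k.toNat) := by
  have hlen : (((l.length : Int) - 1) - (-1)).toNat = l.length := by omega
  rw [PySem.List.pyRange_neg_one, hlen, List.foldl_map,
    pv_fold_suf_aux l k hk l.length le_rfl]
  dsimp only
  apply List.ext_getElem
  · simp
  · intro i h1 h2
    simp only [List.length_reverse, List.length_map, List.length_range] at h1 h2
    rw [List.getElem_reverse]
    simp only [List.getElem_map, List.getElem_range, List.length_map, List.length_range]
    congr 1
    omega

theorem pv_match_id (o : Option Int) :
    (match o with | none => none | some s => some s) = o := by
  cases o <;> rfl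

-- ===== VERDICT (by name: the statement is the Claim_ definition above) =====
theorem second_largest_in_sliding_window_spec : Claim_equal_second_largest_in_sliding_window := by
  intro nums k _
  unfold Spec_second_largest_in_sliding_window
  by_cases h1 : nums.length < 2 ∨ k < 2
  · unfold second_largest_in_sliding_window second_largest_in_sliding_window_alt
    rw [if_pos h1, if_pos h1]
  · by_cases h2 : (nums.length : Int) < k
    · have hnil : PySem.List.pyRange 0 ((nums.length : Int) - k + 1) 1 = [] :=
        PySem.List.pyRange_one_eq_nil (by omega)
      unfold second_largest_in_sliding_window second_largest_in_sliding_window_alt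
      rw [if_neg h1, if_neg h1]
      simp [hnil, h2]
    · have h1c := h1
      push_neg at h1c
      obtain ⟨hlen2, hk2⟩ := h1c
      have hk0 : 0 < k := by omega
      have hcast : (k.toNat : Int) = k := Int.toNat_of_nonneg (by omega)
      have hKN : k.toNat ≤ nums.length := by omega
      have hK2 : 2 ≤ k.toNat := by omega
      have hrange : ((nums.length : Int) - k + 1) = ((nums.length - k.toNat + 1 : Nat) : Int) := by
        push_cast
        omega
      have hA : second_largest_in_sliding_window nums k
          = (List.range (nums.length - k.toNat + 1)).map (fun (m : Nat) =>
              (match ((PySem.List.slice nums (some (m : Int)) (some ((m : Int) + k))).foldl pvStepA (none, none)).2 with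
               | none => none | some s => some s)) := by
        unfold second_largest_in_sliding_window
        rw [if_neg h1, hrange, PySem.List.pyRange_zero_natCast, List.foldl_map]
        exact (PySem.List.foldl_append_singleton_eq_map
          (fun (m : Nat) =>
            (match ((PySem.List.slice nums (some (m : Int)) (some ((m : Int) + k))).foldl pvStepA (none, none)).2 with
             | none => none | some s => some s))
          (List.range (nums.length - k.toNat + 1)) []).trans (List.nil_append _)
      have hB : second_largest_in_sliding_window_alt nums k
          = (List.range (nums.length - k.toNat + 1)).map (fun (m : Nat) =>
              (pvMerge
                (PySem.List.pyGetD ((List.range nums.length).map (pvSuf nums k.toNat)) (m : Int) (none, none))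
                (PySem.List.pyGetD ((List.range nums.length).map (pvPre nums k.toNat)) ((m : Int) + k - 1) (none, none))).2) := by
        unfold second_largest_in_sliding_window_alt
        rw [if_neg h1]
        simp only [h2, if_false]
        rw [pv_fold_pre nums k hk0, pv_fold_suf nums k hk0, hrange,
          PySem.List.pyRange_zero_natCast, List.map_map]
        apply List.map_congr_left
        intro a _
        rfl
      rw [hA, hB]
      apply List.map_congr_left
      intro m hm
      rw [List.mem_range] at hm
      have hmN : m < nums.length := by omega
      have hmK : m + k.toNat ≤ nums.length := by omega
      have hpreidx : m + k.toNat - 1 < nums.length := by omega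
      have hgs : PySem.List.pyGetD ((List.range nums.length).map (pvSuf nums k.toNat)) (m : Int) (none, none)
          = pvSuf nums k.toNat m := by
        rw [PySem.List.pyGetD_natCast,
          List.getD_eq_getElem _ _ (by simpa using hmN), List.getElem_map, List.getElem_range]
      have hix : ((m : Int) + k - 1) = ((m + k.toNat - 1 : Nat) : Int) := by
        push_cast
        omega
      have hgp : PySem.List.pyGetD ((List.range nums.length).map (pvPre nums k.toNat)) ((m : Int) + k - 1) (none, none)
          = pvPre nums k.toNat (m + k.toNat - 1) := by
        rw [hix, PySem.List.pyGetD_natCast,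
          List.getD_eq_getElem _ _ (by simpa using hpreidx), List.getElem_map, List.getElem_range]
      have hslice : PySem.List.slice nums (some (m : Int)) (some ((m : Int) + k))
          = (nums.drop m).take k.toNat := by
        conv_lhs => rw [← hcast]
        exact PySem.List.slice_natCast_add nums m k.toNat
      rw [hgs, hgp, pv_match_id, hslice,
        pv_window nums k.toNat (by omega) m hmK]
      rfl
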